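-- pv_equiv track=rewrite | github.com/ElchaabiMohamed/InferCode_SVM | NC-5690-python-files/program_3021.py | verifSuiteAriGeo
-- ===== SOURCE A (Python) =====
-- def verifSuiteAriGeo(liste,a,b):
--   suite=liste[0]
--   i=1
--   res=True
--   while i<len(liste) and res==True:
--     suite=a*suite+b
--     if suite==liste[i]:
--       res=True
--     else:
--       res=False
--     i+=1
--   return res
-- ===== SOURCE B (Python) =====
-- def verifSuiteAriGeo(liste, a, b):
--     pred = [liste[0]]
--     for _ in range(len(liste) - 1):
--         pred.append(a * pred[-1] + b)
--     return pred == liste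
-- ===== Notes on version B (the rewrite author's own statement) =====
-- stated objective: alternative
-- what changed: B builds the full predicted arithmetic-geometric sequence from the first element and compares it to the input list, instead of A's interleaved index loop with a running boolean flag and early exit.
import Mathlib
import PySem

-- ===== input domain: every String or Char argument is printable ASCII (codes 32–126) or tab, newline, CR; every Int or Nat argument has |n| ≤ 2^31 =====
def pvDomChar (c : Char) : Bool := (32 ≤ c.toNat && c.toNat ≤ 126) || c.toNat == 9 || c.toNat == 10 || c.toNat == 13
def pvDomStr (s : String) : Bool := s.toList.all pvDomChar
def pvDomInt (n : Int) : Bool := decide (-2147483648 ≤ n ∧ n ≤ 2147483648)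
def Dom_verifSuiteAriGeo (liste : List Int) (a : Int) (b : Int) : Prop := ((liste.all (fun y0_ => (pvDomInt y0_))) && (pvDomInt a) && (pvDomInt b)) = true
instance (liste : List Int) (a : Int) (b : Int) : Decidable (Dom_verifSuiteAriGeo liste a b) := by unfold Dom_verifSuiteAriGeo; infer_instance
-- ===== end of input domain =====

-- B builds the full predicted sequence and compares it to the input list, instead of A's
-- interleaved index loop with a running flag; same cost, different decomposition.


-- ===== PORT A =====
-- the while loop: state (suite, i, res); runs while i < len(liste) and res
def pvALoop (liste : List Int) (a : Int) (b : Int) (suite : Int) (i : Nat) (res : Bool) : Bool :=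
  if i < liste.length ∧ res = true then
    let suite' := a * suite + b
    let res' : Bool := decide (some suite' = PySem.List.pyGet? liste (i : Int))
    pvALoop liste a b suite' (i + 1) res'
  else res
termination_by liste.length - i

def verifSuiteAriGeo (liste : List Int) (a : Int) (b : Int) : Bool :=
  match PySem.List.pyGet? liste 0 with
  | none => false          -- liste[0] raises IndexError in Python; excluded by Pre_
  | some suite => pvALoop liste a b suite 1 true

-- ===== PORT B =====
-- pred starts as [liste[0]]; each of the (len-1) iterations appends a*pred[-1]+b
def pvBuild (a : Int) (b : Int) (last : Int) : Nat → List Int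
  | 0 => []
  | n + 1 => let nxt := a * last + b; nxt :: pvBuild a b nxt n

def verifSuiteAriGeo_alt (liste : List Int) (a : Int) (b : Int) : Bool :=
  match PySem.List.pyGet? liste 0 with
  | none => false          -- liste[0] raises IndexError in Python; excluded by Pre_
  | some h => decide (h :: pvBuild a b h (liste.length - 1) = liste)

-- ===== PRECONDITION & SPEC =====
-- A raises IndexError on the empty list (liste[0]); B raises there too.
def Pre_verifSuiteAriGeo (liste : List Int) (a : Int) (b : Int) : Prop := liste ≠ []
instance (liste : List Int) (a : Int) (b : Int) : Decidable (Pre_verifSuiteAriGeo liste a b) := by unfold Pre_verifSuiteAriGeo; infer_instance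
def pvWitness_verifSuiteAriGeo : List Int × Int × Int := ([1, 5, 13], 2, 3)

def Spec_verifSuiteAriGeo (liste : List Int) (a : Int) (b : Int) (out : Bool) : Prop := out = verifSuiteAriGeo_alt liste a b
instance (liste : List Int) (a : Int) (b : Int) (out : Bool) : Decidable (Spec_verifSuiteAriGeo liste a b out) := by unfold Spec_verifSuiteAriGeo; infer_instance

-- ===== CLAIM (what is proved, stated in full; the proofs are below) =====
def Claim_equal_verifSuiteAriGeo : Prop := ∀ (liste : List Int) (a : Int) (b : Int), Dom_verifSuiteAriGeo liste a b → Pre_verifSuiteAriGeo liste a b → Spec_verifSuiteAriGeo liste a b (verifSuiteAriGeo liste a b)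

-- ===== LEMMAS AND PROOFS =====

-- loop invariant: with res = true and i ≤ len, A's loop decides whether the sequence
-- predicted from `suite` equals the rest of the list from index i on
theorem pvALoop_eq (liste : List Int) (a b : Int) :
    ∀ (n i : Nat) (suite : Int), liste.length - i = n → i ≤ liste.length →
      pvALoop liste a b suite i true
        = decide (pvBuild a b suite (liste.length - i) = liste.drop i) := by
  intro n
  induction n with
  | zero =>
    intro i suite hn hle
    have hi : i = liste.length := by omega
    rw [pvALoop]
    simp [hi, pvBuild]
  | succ n ih =>
    intro i suite hn hle
    have hi : i < liste.length := by omega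
    rw [pvALoop]
    simp only [hi, and_self, if_true]
    have hget : PySem.List.pyGet? liste (i : Int) = some liste[i] := by
      simp [PySem.List.pyGet?, PySem.List.pyIdx?, hi, Int.toNat_natCast]
    have hcnt : liste.length - i = (liste.length - (i + 1)) + 1 := by omega
    have hdrop : liste.drop i = liste[i] :: liste.drop (i + 1) :=
      List.drop_eq_getElem_cons hi
    by_cases heq : a * suite + b = liste[i]
    · have hres : decide (some (a * suite + b) = PySem.List.pyGet? liste (i : Int)) = true := by
        rw [hget, heq]; simp
      rw [hres, ih (i + 1) (a * suite + b) (by omega) (by omega)]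
      rw [hcnt, hdrop, decide_eq_decide]
      simp only [pvBuild]
      rw [heq]
      exact ⟨fun h => by rw [h], fun h => (List.cons.inj h).2⟩
    · have hres : decide (some (a * suite + b) = PySem.List.pyGet? liste (i : Int)) = false := by
        rw [hget]; simpa using heq
      rw [hres, pvALoop]
      simp only [Bool.false_eq_true, and_false, if_false]
      rw [hcnt, hdrop]
      simp only [pvBuild]
      symm
      rw [decide_eq_false_iff_not]
      intro hcontra
      exact heq (List.cons.inj hcontra).1

theorem verifSuiteAriGeo_spec : Claim_equal_verifSuiteAriGeo := by
  intro liste a b _ hpre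
  unfold Spec_verifSuiteAriGeo verifSuiteAriGeo verifSuiteAriGeo_alt
  match liste, hpre with
  | x :: rest, _ =>
    have hget0 : PySem.List.pyGet? (x :: rest) (0 : Int) = some x := by
      simp [PySem.List.pyGet?, PySem.List.pyIdx?]
    rw [hget0]
    have := pvALoop_eq (x :: rest) a b ((x :: rest).length - 1) 1 x rfl (by simp)
    simp only [List.length_cons, Nat.add_sub_cancel, List.drop_one, List.tail_cons] at this ⊢
    rw [this]
    simp
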